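-- pv_equiv track=rewrite | github.com/AEX-WEX/Vehicle-Specification-Extraction-RAG-System | src/evaluation.py | _compare_unit
-- ===== SOURCE A (Python) =====
-- def _compare_unit(unit1: str, unit2: str) -> bool:
--     """Compare units (with common aliases)."""
--     unit_aliases = {
--         'nm': ['nm', 'n-m', 'newton-meter'],
--         'ft-lb': ['ft-lb', 'ft-lbs', 'lb-ft', 'lbf-ft'],
--         'liter': ['liter', 'liters', 'l', 'lt'],
--         'bar': ['bar', 'bars'],
--         'psi': ['psi', 'lb/in2'],
--     }
--
--     unit1_normalized = unit1.strip().lower()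
--     unit2_normalized = unit2.strip().lower()
--
--     # Check direct match
--     if unit1_normalized == unit2_normalized:
--         return True
--
--     # Check aliases
--     for standard, aliases in unit_aliases.items():
--         if unit1_normalized in aliases and unit2_normalized in aliases:
--             return True
--
--     return False
-- ===== SOURCE B (Python) =====
-- # Flat alias -> canonical-unit table built once; compare canonical forms,
-- # defaulting an unknown unit to itself so unknowns match only when literally equal.
-- _CANON = {
--     'nm': 'nm', 'n-m': 'nm', 'newton-meter': 'nm',
--     'ft-lb': 'ft-lb', 'ft-lbs': 'ft-lb', 'lb-ft': 'ft-lb', 'lbf-ft': 'ft-lb',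
--     'liter': 'liter', 'liters': 'liter', 'l': 'liter', 'lt': 'liter',
--     'bar': 'bar', 'bars': 'bar',
--     'psi': 'psi', 'lb/in2': 'psi',
-- }
--
-- def _compare_unit(unit1: str, unit2: str) -> bool:
--     u1 = unit1.strip().lower()
--     u2 = unit2.strip().lower()
--     return _CANON.get(u1, u1) == _CANON.get(u2, u2)
-- ===== Notes on version B (the rewrite author's own statement) =====
-- stated objective: simpler
-- what changed: Replaced the per-call scan over alias groups (membership test of both units in every group) with a flat alias-to-canonical table built once, so the function is two lookups (defaulting an unknown unit to itself) and one equality.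
import Mathlib
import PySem

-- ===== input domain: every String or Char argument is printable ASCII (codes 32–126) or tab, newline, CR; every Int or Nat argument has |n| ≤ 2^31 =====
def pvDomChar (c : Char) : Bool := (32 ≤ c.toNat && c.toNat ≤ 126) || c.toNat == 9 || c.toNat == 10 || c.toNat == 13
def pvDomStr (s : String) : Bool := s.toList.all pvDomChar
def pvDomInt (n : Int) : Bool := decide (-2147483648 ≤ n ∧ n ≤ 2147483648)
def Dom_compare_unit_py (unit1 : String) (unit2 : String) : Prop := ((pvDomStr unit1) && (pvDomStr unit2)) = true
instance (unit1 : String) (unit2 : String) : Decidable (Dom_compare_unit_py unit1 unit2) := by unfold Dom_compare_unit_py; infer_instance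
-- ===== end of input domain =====

-- B replaces A's per-call scan over alias groups by a flat alias->canonical table and two lookups (simpler).


-- ===== PORT A =====
def pvUnitAliases : List (String × List String) :=
  [("nm", ["nm", "n-m", "newton-meter"]),
   ("ft-lb", ["ft-lb", "ft-lbs", "lb-ft", "lbf-ft"]),
   ("liter", ["liter", "liters", "l", "lt"]),
   ("bar", ["bar", "bars"]),
   ("psi", ["psi", "lb/in2"])]

-- the 'for standard, aliases in unit_aliases.items(): if u1 in aliases and u2 in aliases: return True' loop
def pvAliasLoop (u1 u2 : String) : List (String × List String) → Bool
  | [] => false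
  | (_, aliases) :: rest =>
    if aliases.contains u1 && aliases.contains u2 then true else pvAliasLoop u1 u2 rest

def compare_unit_py (unit1 : String) (unit2 : String) : Bool :=
  let u1 := PySem.Str.lower (PySem.Str.strip unit1)
  let u2 := PySem.Str.lower (PySem.Str.strip unit2)
  if u1 == u2 then true
  else pvAliasLoop u1 u2 pvUnitAliases

-- ===== PORT B =====
def pvCanon : PySem.Dict String String :=
  PySem.Dict.ofList
    [("nm", "nm"), ("n-m", "nm"), ("newton-meter", "nm"),
     ("ft-lb", "ft-lb"), ("ft-lbs", "ft-lb"), ("lb-ft", "ft-lb"), ("lbf-ft", "ft-lb"),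
     ("liter", "liter"), ("liters", "liter"), ("l", "liter"), ("lt", "liter"),
     ("bar", "bar"), ("bars", "bar"),
     ("psi", "psi"), ("lb/in2", "psi")]

def compare_unit_py_alt (unit1 : String) (unit2 : String) : Bool :=
  let u1 := PySem.Str.lower (PySem.Str.strip unit1)
  let u2 := PySem.Str.lower (PySem.Str.strip unit2)
  pvCanon.getD u1 u1 == pvCanon.getD u2 u2

-- ===== PRECONDITION & SPEC =====
def Spec_compare_unit_py (unit1 : String) (unit2 : String) (out : Bool) : Prop := out = compare_unit_py_alt unit1 unit2
instance (unit1 : String) (unit2 : String) (out : Bool) : Decidable (Spec_compare_unit_py unit1 unit2 out) := by unfold Spec_compare_unit_py; infer_instance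

-- ===== CLAIM (what is proved, stated in full; the proofs are below) =====
def Claim_equal_compare_unit_py : Prop := ∀ (unit1 : String) (unit2 : String), Dom_compare_unit_py unit1 unit2 → Spec_compare_unit_py unit1 unit2 (compare_unit_py unit1 unit2)

-- ===== LEMMAS AND PROOFS =====
-- all alias strings (the keys of pvCanon / the members of A's alias lists)
def pvAliasKeys : List String :=
  ["nm", "n-m", "newton-meter", "ft-lb", "ft-lbs", "lb-ft", "lbf-ft",
   "liter", "liters", "l", "lt", "bar", "bars", "psi", "lb/in2"]

theorem pvCanon_mk : pvCanon = PySem.Dict.mk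
    [("nm", "nm"), ("n-m", "nm"), ("newton-meter", "nm"),
     ("ft-lb", "ft-lb"), ("ft-lbs", "ft-lb"), ("lb-ft", "ft-lb"), ("lbf-ft", "ft-lb"),
     ("liter", "liter"), ("liters", "liter"), ("l", "liter"), ("lt", "liter"),
     ("bar", "bar"), ("bars", "bar"),
     ("psi", "psi"), ("lb/in2", "psi")] := by decide

theorem pvCanon_getD_not_mem (n : String) (h : n ∉ pvAliasKeys) : pvCanon.getD n n = n := by
  simp [pvAliasKeys] at h
  obtain ⟨h1,h2,h3,h4,h5,h6,h7,h8,h9,h10,h11,h12,h13,h14,h15⟩ := h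
  rw [pvCanon_mk]
  simp [PySem.Dict.getD_eq_get?_getD, PySem.Dict.get?,
        Ne.symm h1, Ne.symm h2, Ne.symm h3, Ne.symm h4, Ne.symm h5, Ne.symm h6, Ne.symm h7,
        Ne.symm h8, Ne.symm h9, Ne.symm h10, Ne.symm h11, Ne.symm h12, Ne.symm h13,
        Ne.symm h14, Ne.symm h15]

theorem pvCanon_getD_mem (n : String) (h : n ∈ pvAliasKeys) : pvCanon.getD n n ∈ pvAliasKeys := by
  fin_cases h <;> decide

theorem pvAliasLoop_not_mem_right (u n : String) (h : n ∉ pvAliasKeys) :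
    pvAliasLoop u n pvUnitAliases = false := by
  simp [pvAliasKeys] at h
  obtain ⟨h1,h2,h3,h4,h5,h6,h7,h8,h9,h10,h11,h12,h13,h14,h15⟩ := h
  simp [pvAliasLoop, pvUnitAliases, h1,h2,h3,h4,h5,h6,h7,h8,h9,h10,h11,h12,h13,h14,h15]

theorem pvAliasLoop_not_mem_left (n u : String) (h : n ∉ pvAliasKeys) :
    pvAliasLoop n u pvUnitAliases = false := by
  simp [pvAliasKeys] at h
  obtain ⟨h1,h2,h3,h4,h5,h6,h7,h8,h9,h10,h11,h12,h13,h14,h15⟩ := h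
  simp [pvAliasLoop, pvUnitAliases, h1,h2,h3,h4,h5,h6,h7,h8,h9,h10,h11,h12,h13,h14,h15]

set_option maxHeartbeats 1000000 in
theorem pvCore_eq (n1 n2 : String) :
    (if n1 == n2 then true else pvAliasLoop n1 n2 pvUnitAliases)
      = (pvCanon.getD n1 n1 == pvCanon.getD n2 n2) := by
  by_cases m1 : n1 ∈ pvAliasKeys <;> by_cases m2 : n2 ∈ pvAliasKeys
  · fin_cases m1 <;> fin_cases m2 <;> decide
  · have hne : n1 ≠ n2 := fun h => m2 (h ▸ m1)
    rw [pvAliasLoop_not_mem_right n1 n2 m2, pvCanon_getD_not_mem n2 m2]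
    simp [hne]
    exact fun h => m2 (h ▸ pvCanon_getD_mem n1 m1)
  · have hne : n1 ≠ n2 := fun h => m1 (h.symm ▸ m2)
    rw [pvAliasLoop_not_mem_left n1 n2 m1, pvCanon_getD_not_mem n1 m1]
    simp [hne]
    exact fun h => m1 (h ▸ pvCanon_getD_mem n2 m2)
  · rw [pvAliasLoop_not_mem_left n1 n2 m1, pvCanon_getD_not_mem n1 m1,
        pvCanon_getD_not_mem n2 m2]
    by_cases h : n1 = n2 <;> simp [h]

-- ===== VERDICT (by name: the statement is the Claim_ definition above) =====
theorem compare_unit_py_spec : Claim_equal_compare_unit_py := by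
  intro u1 u2 _
  unfold Spec_compare_unit_py compare_unit_py compare_unit_py_alt
  exact pvCore_eq _ _
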